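-- pv_equiv track=rewrite | github.com/DMGiulioRomano/PGE-ls | server.py | _get_stream_bounds
-- ===== SOURCE A (Python) =====
-- def _get_stream_bounds(lines, cursor_line):
--     """Ritorna (start, end) dello stream che contiene cursor_line."""
--     stream_start = 0
--     for i in range(cursor_line, -1, -1):
--         raw = lines[i]
--         stripped = raw.strip()
--         leading = len(raw) - len(raw.lstrip())
--         if (stripped.startswith('- ') or stripped == '-') and leading == 2:
--             stream_start = i
--             break
--
--     stream_end = len(lines)
--     for i in range(stream_start + 1, len(lines)):
--         raw = lines[i]
--         stripped = raw.strip()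
--         leading = len(raw) - len(raw.lstrip())
--         if (stripped.startswith('- ') or stripped == '-') and leading == 2:
--             stream_end = i
--             break
--
--     return stream_start, stream_end
-- ===== SOURCE B (Python) =====
-- def _get_stream_bounds(lines, cursor_line):
--     """Ritorna (start, end) dello stream che contiene cursor_line."""
--     is_delim = [(raw.strip().startswith('- ') or raw.strip() == '-')
--                 and len(raw) - len(raw.lstrip()) == 2
--                 for raw in lines]
--     stream_start = max((i for i in range(cursor_line + 1) if is_delim[i]), default=0)
--     stream_end = min((i for i in range(stream_start + 1, len(lines)) if is_delim[i]),
--                      default=len(lines))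
--     return stream_start, stream_end
-- ===== Notes on version B (the rewrite author's own statement) =====
-- stated objective: alternative
-- what changed: Replaces A's two targeted partial scans with break (backward from the cursor, then forward) by one pass building a boolean table of delimiter lines, from which start and end are picked as max/min selections over index ranges with defaults; Pre_ excludes cursor_line >= len(lines), where both programs raise IndexError when indexing the line/table at cursor_line.
import Mathlib
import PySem

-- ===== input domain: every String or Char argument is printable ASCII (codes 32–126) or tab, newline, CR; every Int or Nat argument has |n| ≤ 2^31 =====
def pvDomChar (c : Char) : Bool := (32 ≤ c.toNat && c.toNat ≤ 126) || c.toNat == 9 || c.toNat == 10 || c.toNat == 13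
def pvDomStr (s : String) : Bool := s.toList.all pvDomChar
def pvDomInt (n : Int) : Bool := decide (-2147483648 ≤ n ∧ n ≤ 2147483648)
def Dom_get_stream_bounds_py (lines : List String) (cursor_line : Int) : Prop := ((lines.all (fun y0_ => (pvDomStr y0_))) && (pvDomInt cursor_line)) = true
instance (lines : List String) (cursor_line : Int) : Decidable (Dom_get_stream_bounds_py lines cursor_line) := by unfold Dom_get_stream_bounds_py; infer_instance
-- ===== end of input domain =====

-- B replaces A's two targeted partial scans by one pass building the boolean table of
-- delimiter lines plus two selections (max/min with defaults) over it (objective: alternative).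


-- ===== PORT A =====
-- the delimiter test both Pythons apply to a line, verbatim:
-- (stripped.startswith('- ') or stripped == '-') and len(raw) - len(raw.lstrip()) == 2
-- (Nat subtraction is exact here: lstrip never lengthens the string)
def pvDelim (raw : String) : Bool :=
  let stripped := PySem.Str.strip raw
  (PySem.Str.startswith stripped "- " || stripped == "-")
    && (PySem.Str.len raw - PySem.Str.len (PySem.Str.lstrip raw) == 2)

-- A's first loop: for i in range(cursor_line, -1, -1): … break  (default 0)
def pvA_back (lines : List String) : List Int → Int
  | [] => 0
  | i :: rest =>
    match PySem.List.pyGet? lines i with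
    | none => 0          -- lines[i] raises IndexError here; excluded by Pre_
    | some raw => if pvDelim raw then i else pvA_back lines rest

-- A's second loop: for i in range(stream_start + 1, len(lines)): … break  (default len(lines))
def pvA_fwd (lines : List String) : List Int → Int
  | [] => (lines.length : Int)
  | i :: rest =>
    match PySem.List.pyGet? lines i with
    | none => (lines.length : Int)   -- unreachable: these indices are in range
    | some raw => if pvDelim raw then i else pvA_fwd lines rest

def get_stream_bounds_py (lines : List String) (cursor_line : Int) : Int × Int :=
  let stream_start := pvA_back lines (PySem.List.pyRange cursor_line (-1) (-1))
  let stream_end := pvA_fwd lines (PySem.List.pyRange (stream_start + 1) (lines.length : Int) 1)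
  (stream_start, stream_end)

-- ===== PORT B =====
-- is_delim = [<delimiter test> for raw in lines]
-- is_delim[i] raises IndexError iff i ≥ len(lines), which happens exactly when
-- cursor_line ≥ len(lines) — excluded by Pre_; the .getD false is never reached on Pre_.
def get_stream_bounds_py_alt (lines : List String) (cursor_line : Int) : Int × Int :=
  let is_delim := lines.map pvDelim
  let stream_start := (PySem.List.max? ((PySem.List.pyRange 0 (cursor_line + 1) 1).filter
      (fun i => (PySem.List.pyGet? is_delim i).getD false)) (fun x => x)).getD 0
  let stream_end := (PySem.List.min? ((PySem.List.pyRange (stream_start + 1) (lines.length : Int) 1).filter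
      (fun i => (PySem.List.pyGet? is_delim i).getD false)) (fun x => x)).getD (lines.length : Int)
  (stream_start, stream_end)

-- ===== PRECONDITION & SPEC =====
-- A indexes lines[cursor_line] first, so it raises IndexError iff cursor_line ≥ len(lines); Pre_ excludes exactly those inputs.
def Pre_get_stream_bounds_py (lines : List String) (cursor_line : Int) : Prop :=
  cursor_line < (lines.length : Int)
instance (lines : List String) (cursor_line : Int) : Decidable (Pre_get_stream_bounds_py lines cursor_line) := by unfold Pre_get_stream_bounds_py; infer_instance

def pvWitness_get_stream_bounds_py : List String × Int := (["  - a", "x", "  - b"], 1)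

def Spec_get_stream_bounds_py (lines : List String) (cursor_line : Int) (out : Int × Int) : Prop := out = get_stream_bounds_py_alt lines cursor_line
instance (lines : List String) (cursor_line : Int) (out : Int × Int) : Decidable (Spec_get_stream_bounds_py lines cursor_line out) := by unfold Spec_get_stream_bounds_py; infer_instance

-- ===== CLAIM (what is proved, stated in full; the proofs are below) =====
def Claim_equal_get_stream_bounds_py : Prop := ∀ (lines : List String) (cursor_line : Int), Dom_get_stream_bounds_py lines cursor_line → Pre_get_stream_bounds_py lines cursor_line → Spec_get_stream_bounds_py lines cursor_line (get_stream_bounds_py lines cursor_line)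

-- ===== LEMMAS AND PROOFS =====

-- proof-only helper: the list of delimiter line indices
def pvDelims (lines : List String) : List Int :=
  ((PySem.List.enumerate lines 0).filter (fun p => pvDelim p.2)).map (fun p => p.1)

theorem mem_pvDelims (lines : List String) (i : Int) :
    i ∈ pvDelims lines ↔ ∃ (k : Nat) (h : k < lines.length), i = (k : Int) ∧ pvDelim lines[k] = true := by
  unfold pvDelims
  simp only [List.mem_map, List.mem_filter, PySem.List.mem_enumerate_iff]
  constructor
  · rintro ⟨⟨j, s⟩, ⟨⟨k, hk, hp⟩, hd⟩, rfl⟩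
    cases hp
    exact ⟨k, hk, by simp, by simpa using hd⟩
  · rintro ⟨k, hk, rfl, hd⟩
    exact ⟨((k : Int), lines[k]), ⟨⟨k, hk, by simp⟩, hd⟩, rfl⟩

theorem pvDelims_nonneg (lines : List String) : ∀ i ∈ pvDelims lines, 0 ≤ i := by
  intro i hi
  obtain ⟨k, hk, rfl, -⟩ := (mem_pvDelims lines i).1 hi
  exact Int.natCast_nonneg k

theorem maxD_eq_of_top {xs : List Int} {n : Int} (hmem : n ∈ xs)
    (hub : ∀ y ∈ xs, y ≤ n) : (PySem.List.max? xs (fun x => x)).getD 0 = n := by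
  cases hx : PySem.List.max? xs (fun x => x) with
  | none => exact absurd (List.ne_nil_of_mem hmem) (by simpa using (PySem.List.max?_eq_none_iff _ _).1 hx)
  | some m =>
    have h1 := PySem.List.max?_isMax hx n hmem
    have h2 := hub m (PySem.List.max?_mem hx)
    simpa using le_antisymm h2 h1

theorem minD_eq_of_bot {xs : List Int} {n d : Int} (hmem : n ∈ xs)
    (hlb : ∀ y ∈ xs, n ≤ y) : (PySem.List.min? xs (fun x => x)).getD d = n := by
  cases hx : PySem.List.min? xs (fun x => x) with
  | none => exact absurd (List.ne_nil_of_mem hmem) (by simpa using (PySem.List.min?_eq_none_iff _ _).1 hx)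
  | some m =>
    have h1 := PySem.List.min?_isMin hx n hmem
    have h2 := hlb m (PySem.List.min?_mem hx)
    simpa using le_antisymm h1 h2

-- A's backward scan from n computes B's max-selection over the delimiter table.
theorem back_spec (lines : List String) (n : Nat) (hn : n < lines.length) :
    pvA_back lines (PySem.List.pyRange (n : Int) (-1) (-1))
      = (PySem.List.max? ((pvDelims lines).filter (fun i => i ≤ (n : Int))) (fun x => x)).getD 0 := by
  induction n with
  | zero =>
    rw [PySem.List.pyRange_neg_one_cons (by omega), PySem.List.pyRange_neg_one_eq_nil (by omega)]
    simp only [pvA_back]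
    rw [show PySem.List.pyGet? lines ((0:Nat):Int) = some lines[0] from by
      rw [PySem.List.pyGet?_natCast]; exact List.getElem?_eq_getElem hn]
    by_cases hd : pvDelim lines[0] = true
    · simp only [hd, if_true]
      refine (maxD_eq_of_top ?_ ?_).symm
      · exact List.mem_filter.2 ⟨(mem_pvDelims lines _).2 ⟨0, hn, rfl, hd⟩, by simp⟩
      · intro y hy
        simpa using (List.mem_filter.1 hy).2
    · simp only [Bool.not_eq_true] at hd
      simp only [hd, Bool.false_eq_true, if_false]
      have hnil : ((pvDelims lines).filter (fun i => i ≤ ((0:Nat) : Int))) = [] := by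
        rw [List.filter_eq_nil_iff]
        intro i hi hle
        obtain ⟨k, hk, rfl, hdk⟩ := (mem_pvDelims lines i).1 hi
        simp only [decide_eq_true_eq] at hle
        have hk0 : k = 0 := by omega
        subst hk0
        rw [hd] at hdk; exact Bool.false_ne_true hdk
      rw [hnil]
      simp [PySem.List.max?]
  | succ m ih =>
    have hm : m < lines.length := Nat.lt_of_succ_lt hn
    rw [PySem.List.pyRange_neg_one_cons (by omega)]
    simp only [pvA_back]
    rw [show ((m+1:Nat):Int) - 1 = ((m:Nat):Int) by push_cast; ring]
    rw [show PySem.List.pyGet? lines ((m+1:Nat):Int) = some lines[m+1] from by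
      rw [PySem.List.pyGet?_natCast]; exact List.getElem?_eq_getElem hn]
    by_cases hd : pvDelim lines[m+1] = true
    · simp only [hd, if_true]
      refine (maxD_eq_of_top ?_ ?_).symm
      · exact List.mem_filter.2 ⟨(mem_pvDelims lines _).2 ⟨m+1, hn, rfl, hd⟩, by simp⟩
      · intro y hy
        simpa using (List.mem_filter.1 hy).2
    · simp only [Bool.not_eq_true] at hd
      simp only [hd, Bool.false_eq_true, if_false]
      rw [ih hm]
      congr 1
      refine congrArg _ (List.filter_congr ?_).symm
      intro i hi
      obtain ⟨k, hk, rfl, hdk⟩ := (mem_pvDelims lines _).1 hi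
      have hkne : k ≠ m + 1 := by
        intro h; subst h; rw [hd] at hdk; exact Bool.false_ne_true hdk
      simp only [decide_eq_decide]
      omega

-- A's forward scan from a computes B's min-selection over the delimiter table.
theorem fwd_spec (lines : List String) (k : Nat) : ∀ (a : Int), 0 ≤ a →
    ((lines.length : Int) - a).toNat = k →
    pvA_fwd lines (PySem.List.pyRange a (lines.length : Int) 1)
      = (PySem.List.min? ((pvDelims lines).filter (fun i => a ≤ i)) (fun x => x)).getD (lines.length : Int) := by
  induction k with
  | zero =>
    intro a ha h0
    have hge : (lines.length : Int) ≤ a := by omega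
    rw [PySem.List.pyRange_one_eq_nil hge]
    have hnil : ((pvDelims lines).filter (fun i => a ≤ i)) = [] := by
      rw [List.filter_eq_nil_iff]
      intro i hi hle
      obtain ⟨j, hj, rfl, -⟩ := (mem_pvDelims lines i).1 hi
      simp only [decide_eq_true_eq] at hle
      omega
    rw [hnil]
    simp [pvA_fwd, PySem.List.min?]
  | succ k ih =>
    intro a ha hk
    have hlt : a < (lines.length : Int) := by omega
    rw [PySem.List.pyRange_one_cons hlt]
    simp only [pvA_fwd]
    rw [PySem.List.pyGet?_eq_some_getElem lines ha hlt]
    by_cases hd : pvDelim lines[a.toNat] = true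
    · simp only [hd, if_true]
      refine (minD_eq_of_bot ?_ ?_).symm
      · refine List.mem_filter.2 ⟨(mem_pvDelims lines a).2 ⟨a.toNat, by omega, by omega, hd⟩, by simp⟩
      · intro y hy
        simpa using (List.mem_filter.1 hy).2
    · simp only [Bool.not_eq_true] at hd
      simp only [hd, Bool.false_eq_true, if_false]
      rw [ih (a+1) (by omega) (by omega)]
      congr 1
      refine congrArg _ (List.filter_congr ?_).symm
      intro i hi
      obtain ⟨j, hj, rfl, hdj⟩ := (mem_pvDelims lines _).1 hi
      have hne : (j : Int) ≠ a := by
        intro h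
        have hja : j = a.toNat := by omega
        subst hja; rw [hd] at hdj; exact Bool.false_ne_true hdj
      simp only [decide_eq_decide]
      omega

-- A's forward scan started at s+1 computes B's strict min-selection.
theorem snd_eq (lines : List String) (s : Int) (hs : 0 ≤ s) :
    pvA_fwd lines (PySem.List.pyRange (s + 1) (lines.length : Int) 1)
      = (PySem.List.min? ((pvDelims lines).filter (fun i => s < i)) (fun x => x)).getD (lines.length : Int) := by
  rw [fwd_spec lines (((lines.length : Int) - (s+1)).toNat) (s+1) (by omega) rfl]
  have hf : ((pvDelims lines).filter (fun i => s + 1 ≤ i)) = ((pvDelims lines).filter (fun i => s < i)) := by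
    refine List.filter_congr ?_
    intro i _
    simp only [decide_eq_decide]
    omega
  rw [hf]

-- B's backward selection list has the same members as the delimiter-table filter (for an in-range bound c).
theorem mem_backList (lines : List String) (c i : Int) (hc : c < (lines.length : Int)) :
    i ∈ (PySem.List.pyRange 0 (c + 1) 1).filter
        (fun i => (PySem.List.pyGet? (lines.map pvDelim) i).getD false)
      ↔ i ∈ (pvDelims lines).filter (fun j => j ≤ c) := by
  simp only [List.mem_filter, PySem.List.mem_pyRange_one]
  constructor
  · rintro ⟨⟨h0, hlt⟩, hp⟩
    have hiL : i < ((lines.map pvDelim).length : Int) := by simp; omega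
    rw [PySem.List.pyGet?_eq_some_getElem _ h0 hiL] at hp
    simp only [Option.getD_some, List.getElem_map] at hp
    refine ⟨(mem_pvDelims lines i).2 ⟨i.toNat, by omega, by omega, hp⟩, by simp; omega⟩
  · rintro ⟨hi, hle⟩
    obtain ⟨k, hk, rfl, hd⟩ := (mem_pvDelims lines _).1 hi
    simp only [decide_eq_true_eq] at hle
    have hiL : ((k : Nat) : Int) < ((lines.map pvDelim).length : Int) := by simp; omega
    refine ⟨⟨by omega, by omega⟩, ?_⟩
    rw [PySem.List.pyGet?_eq_some_getElem _ (by omega) hiL]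
    simpa using hd

-- B's forward selection list has the same members as the strict delimiter-table filter (for s ≥ 0).
theorem mem_fwdList (lines : List String) (s i : Int) (hs : 0 ≤ s) :
    i ∈ (PySem.List.pyRange (s + 1) (lines.length : Int) 1).filter
        (fun i => (PySem.List.pyGet? (lines.map pvDelim) i).getD false)
      ↔ i ∈ (pvDelims lines).filter (fun j => s < j) := by
  simp only [List.mem_filter, PySem.List.mem_pyRange_one]
  constructor
  · rintro ⟨⟨h0, hlt⟩, hp⟩
    have hiL : i < ((lines.map pvDelim).length : Int) := by simpa using hlt
    rw [PySem.List.pyGet?_eq_some_getElem _ (by omega) hiL] at hp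
    simp only [Option.getD_some, List.getElem_map] at hp
    refine ⟨(mem_pvDelims lines i).2 ⟨i.toNat, by omega, by omega, hp⟩, by simp; omega⟩
  · rintro ⟨hi, hgt⟩
    obtain ⟨k, hk, rfl, hd⟩ := (mem_pvDelims lines _).1 hi
    simp only [decide_eq_true_eq] at hgt
    have hiL : ((k : Nat) : Int) < ((lines.map pvDelim).length : Int) := by simp; omega
    refine ⟨⟨by omega, by omega⟩, ?_⟩
    rw [PySem.List.pyGet?_eq_some_getElem _ (by omega) hiL]
    simpa using hd

theorem maxD_congr {xs ys : List Int} (h : ∀ i, i ∈ xs ↔ i ∈ ys) :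
    (PySem.List.max? xs (fun x => x)).getD 0 = (PySem.List.max? ys (fun x => x)).getD 0 := by
  cases hx : PySem.List.max? xs (fun x => x) with
  | none =>
    have hxs : xs = [] := by simpa using (PySem.List.max?_eq_none_iff _ _).1 hx
    have hys : ys = [] := List.eq_nil_iff_forall_not_mem.2 (fun y hy => by
      have := (h y).2 hy; rw [hxs] at this; simp at this)
    rw [hys]
    simp [PySem.List.max?]
  | some m =>
    simp only [Option.getD_some]
    exact (maxD_eq_of_top ((h m).1 (PySem.List.max?_mem hx))
      (fun y hy => by simpa using PySem.List.max?_isMax hx y ((h y).2 hy))).symm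

theorem minD_congr {xs ys : List Int} (d : Int) (h : ∀ i, i ∈ xs ↔ i ∈ ys) :
    (PySem.List.min? xs (fun x => x)).getD d = (PySem.List.min? ys (fun x => x)).getD d := by
  cases hx : PySem.List.min? xs (fun x => x) with
  | none =>
    have hxs : xs = [] := by simpa using (PySem.List.min?_eq_none_iff _ _).1 hx
    have hys : ys = [] := List.eq_nil_iff_forall_not_mem.2 (fun y hy => by
      have := (h y).2 hy; rw [hxs] at this; simp at this)
    rw [hys]
    simp [PySem.List.min?]
  | some m =>
    simp only [Option.getD_some]
    exact (minD_eq_of_bot ((h m).1 (PySem.List.min?_mem hx))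
      (fun y hy => by simpa using PySem.List.min?_isMin hx y ((h y).2 hy))).symm

-- ===== VERDICT (by name: the statement is the Claim_ definition above) =====
theorem get_stream_bounds_py_spec : Claim_equal_get_stream_bounds_py := by
  intro lines cursor_line _ hp
  unfold Pre_get_stream_bounds_py at hp
  unfold Spec_get_stream_bounds_py get_stream_bounds_py_alt
  show (_, _) = (_, _)
  by_cases hc : cursor_line < 0
  · have hA : pvA_back lines (PySem.List.pyRange cursor_line (-1) (-1)) = 0 := by
      rw [PySem.List.pyRange_neg_one_eq_nil (by omega)]
      rfl
    have hB : (PySem.List.pyRange 0 (cursor_line + 1) 1) = [] :=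
      PySem.List.pyRange_one_eq_nil (by omega)
    show (pvA_back lines (PySem.List.pyRange cursor_line (-1) (-1)),
          pvA_fwd lines (PySem.List.pyRange (pvA_back lines (PySem.List.pyRange cursor_line (-1) (-1)) + 1) (lines.length : Int) 1)) = _
    rw [hA, hB]
    rw [show (PySem.List.max? (List.filter _ ([] : List Int)) (fun x => x)).getD 0 = 0 from by simp [PySem.List.max?]]
    rw [snd_eq lines 0 le_rfl]
    exact congrArg _ (minD_congr _ (fun i => (mem_fwdList lines 0 i le_rfl).symm))
  · have hrw : cursor_line = ((cursor_line.toNat : Nat) : Int) := by omega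
    have hlen : cursor_line.toNat < lines.length := by omega
    rw [hrw]
    show (pvA_back lines (PySem.List.pyRange ((cursor_line.toNat : Nat) : Int) (-1) (-1)),
          pvA_fwd lines (PySem.List.pyRange (pvA_back lines (PySem.List.pyRange ((cursor_line.toNat : Nat) : Int) (-1) (-1)) + 1) (lines.length : Int) 1)) = _
    rw [back_spec lines cursor_line.toNat hlen]
    have hmax : (PySem.List.max? ((pvDelims lines).filter (fun i => i ≤ ((cursor_line.toNat : Nat) : Int))) (fun x => x)).getD 0
        = (PySem.List.max? ((PySem.List.pyRange 0 (((cursor_line.toNat : Nat) : Int) + 1) 1).filter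
            (fun i => (PySem.List.pyGet? (lines.map pvDelim) i).getD false)) (fun x => x)).getD 0 :=
      maxD_congr (fun i => (mem_backList lines _ i (by omega)).symm)
    have hs : 0 ≤ (PySem.List.max? ((pvDelims lines).filter (fun i => i ≤ ((cursor_line.toNat : Nat) : Int))) (fun x => x)).getD 0 := by
      cases hx : PySem.List.max? ((pvDelims lines).filter (fun i => i ≤ ((cursor_line.toNat : Nat) : Int))) (fun x => x) with
      | none => simp
      | some m =>
        have hm := PySem.List.max?_mem hx
        simpa using pvDelims_nonneg lines m (List.mem_filter.1 hm).1
    rw [snd_eq lines _ hs, hmax]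
    exact congrArg _ (minD_congr _ (fun i => (mem_fwdList lines _ i (hmax ▸ hs)).symm))
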